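-- pv_equiv track=rewrite | github.com/CSolgaard/Msc_Thesis | Kalman_GIRAFE_vol3.py | count_false_beginning_end
-- ===== SOURCE A (Python) =====
-- def count_false_beginning_end(index):
--     # Count False values at the beginning
--     count_beginning = 0
--     for val in index:
--         if val == False:
--             count_beginning += 1
--         else:
--             break  # Break the loop when encountering the first True value
--
--     # Count False values at the end
--     count_end = 0
--     for val in reversed(index):
--         if val == False:
--             count_end += 1
--         else:
--             break  # Break the loop when encountering the first True value
--
--     return count_beginning, count_end
-- ===== SOURCE B (Python) =====
-- def count_false_beginning_end(index):
--     n = len(index)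
--     breaks = [i for i, val in enumerate(index) if val != False]
--     if not breaks:
--         return n, n
--     return breaks[0], n - 1 - breaks[-1]
-- ===== Notes on version B (the rewrite author's own statement) =====
-- stated objective: alternative
-- what changed: Replaces the two early-exiting run-scans (forward and reversed) by one full enumerate pass that collects the indices of non-False values, then reads the two counts off the first and last such index (or returns (n,n) when there are none).
import Mathlib
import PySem

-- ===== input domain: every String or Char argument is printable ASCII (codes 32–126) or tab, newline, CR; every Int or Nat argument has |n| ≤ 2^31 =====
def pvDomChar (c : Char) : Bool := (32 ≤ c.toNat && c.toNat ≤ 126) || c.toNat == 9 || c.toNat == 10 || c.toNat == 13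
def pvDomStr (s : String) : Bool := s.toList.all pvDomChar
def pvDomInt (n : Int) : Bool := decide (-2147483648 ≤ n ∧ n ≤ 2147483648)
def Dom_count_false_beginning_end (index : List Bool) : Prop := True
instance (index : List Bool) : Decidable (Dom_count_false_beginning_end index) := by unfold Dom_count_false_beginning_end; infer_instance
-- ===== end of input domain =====

-- B does one enumerate pass collecting break indices instead of A's two early-exiting scans; same cost, different decomposition.

-- ===== PORT A =====
-- the forward loop: count False until the first True, then break
def pvCountLead (l : List Bool) : Int :=
  match l with
  | [] => 0
  | val :: t => if val == false then 1 + pvCountLead t else 0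

def count_false_beginning_end (index : List Bool) : Int × Int :=
  (pvCountLead index, pvCountLead index.reverse)

-- ===== PORT B =====
-- the single pass of Source B: indices i with index[i] != False, in order (enumerate)
def pvBreaks (l : List Bool) (i : Int) : List Int :=
  match l with
  | [] => []
  | val :: t => if val != false then i :: pvBreaks t (i + 1) else pvBreaks t (i + 1)

def count_false_beginning_end_alt (index : List Bool) : Int × Int :=
  let n : Int := index.length
  match h : pvBreaks index 0 with
  | [] => (n, n)
  | a :: t => (a, n - 1 - (a :: t).getLast (by simp))

-- ===== PRECONDITION & SPEC =====
def Spec_count_false_beginning_end (index : List Bool) (out : Int × Int) : Prop := out = count_false_beginning_end_alt index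
instance (index : List Bool) (out : Int × Int) : Decidable (Spec_count_false_beginning_end index out) := by unfold Spec_count_false_beginning_end; infer_instance

-- ===== CLAIM (what is proved, stated in full; the proofs are below) =====
def Claim_equal_count_false_beginning_end : Prop := ∀ (index : List Bool), Dom_count_false_beginning_end index → Spec_count_false_beginning_end index (count_false_beginning_end index)

-- ===== LEMMAS AND PROOFS =====

theorem pvBreaks_nil_iff (l : List Bool) (i : Int) :
    pvBreaks l i = [] ↔ ∀ b ∈ l, b = false := by
  induction l generalizing i with
  | nil => simp [pvBreaks]
  | cons v t ih =>
    cases v <;> simp [pvBreaks, ih]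

theorem pvCountLead_all_false (l : List Bool) (h : ∀ b ∈ l, b = false) :
    pvCountLead l = l.length := by
  induction l with
  | nil => simp [pvCountLead]
  | cons v t ih =>
    have hv : v = false := h v (by simp)
    subst hv
    simp only [pvCountLead, List.length_cons, if_pos (by decide : (false == false) = true)]
    rw [ih (fun b hb => h b (by simp [hb]))]
    push_cast; ring

theorem pvBreaks_head (l : List Bool) (i : Int) (a : Int) (t : List Int)
    (h : pvBreaks l i = a :: t) : a = i + pvCountLead l := by
  induction l generalizing i a t with
  | nil => simp [pvBreaks] at h
  | cons v s ih =>
    cases v with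
    | false =>
      simp only [pvBreaks, bne_self_eq_false] at h
      have := ih (i + 1) a t (by simpa using h)
      simp [pvCountLead, this]; ring
    | true =>
      simp only [pvBreaks] at h
      simp only [pvCountLead, if_neg (by decide : ¬ (true == false) = true)]
      simp at h
      omega

theorem pvBreaks_append (l : List Bool) (b : Bool) (i : Int) :
    pvBreaks (l ++ [b]) i = pvBreaks l i ++ (if b then [i + l.length] else []) := by
  induction l generalizing i with
  | nil => cases b <;> simp [pvBreaks]
  | cons v t ih =>
    cases v <;> cases b <;> simp [pvBreaks, ih] <;> omega

theorem pvCountLead_reverse (l : List Bool) (hne : pvBreaks l 0 ≠ []) :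
    pvCountLead l.reverse = (l.length : Int) - 1 - ((pvBreaks l 0).getLast?).getD 0 := by
  induction l using List.reverseRecOn with
  | nil => simp [pvBreaks] at hne
  | append_singleton m b ih =>
    cases b with
    | true =>
      rw [pvBreaks_append]
      simp [pvCountLead]
    | false =>
      rw [pvBreaks_append] at hne ⊢
      simp only [if_neg (by decide : ¬ false = true), List.append_nil] at hne ⊢
      have := ih hne
      simp only [List.reverse_append, List.reverse_cons, List.reverse_nil, List.nil_append,
        List.singleton_append, pvCountLead, if_pos (by decide : (false == false) = true)]
      rw [this]
      simp [List.length_append]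
      omega

-- ===== VERDICT (by name: the statement is the Claim_ definition above) =====
theorem count_false_beginning_end_spec : Claim_equal_count_false_beginning_end := by
  intro index _
  unfold Spec_count_false_beginning_end count_false_beginning_end count_false_beginning_end_alt
  cases h : pvBreaks index 0 with
  | nil =>
    have hall := (pvBreaks_nil_iff index 0).mp h
    have h1 := pvCountLead_all_false index hall
    have h2 := pvCountLead_all_false index.reverse (by simpa using fun b hb => hall b hb)
    simp [h1, h2]
  | cons a t =>
    have h1 := pvBreaks_head index 0 a t h
    have h2 := pvCountLead_reverse index (by rw [h]; simp)
    rw [h] at h2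
    have hg : ((a :: t).getLast?).getD 0 = (a :: t).getLast (by simp) := by
      rw [List.getLast?_eq_some_getLast (by simp : (a :: t) ≠ [])]
      rfl
    rw [hg] at h2
    simp only [h2]
    rw [h1]
    simp
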